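-- pv_equiv track=rewrite | github.com/jmussmann/adventofcode2024 | Day-09/sol-02.py | find_fitting_block
-- ===== SOURCE A (Python) =====
-- def find_fitting_block(layout, size):
--
--     free_size = 0
--     for i in range(0, len(layout)):
--         if layout[i] == ".":
--             free_size += 1
--         else:
--             if size <= free_size:
--                 return i-free_size
--             free_size = 0
--     return -1
-- ===== SOURCE B (Python) =====
-- def find_fitting_block(layout, size):
--     # boundary decomposition: list the non-free indices, then measure the gaps between them
--     bounds = [i for i, cell in enumerate(layout) if cell != "."]
--     prev = -1
--     for j in bounds:
--         if size <= j - prev - 1: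
--             return prev + 1
--         prev = j
--     return -1
-- ===== Notes on version B (the rewrite author's own statement) =====
-- stated objective: alternative
-- what changed: Replaces the running free-run counter scan by first extracting the list of non-free (boundary) indices and then returning the start of the first gap between consecutive boundaries that is wide enough, by pure index arithmetic.
import Mathlib
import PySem

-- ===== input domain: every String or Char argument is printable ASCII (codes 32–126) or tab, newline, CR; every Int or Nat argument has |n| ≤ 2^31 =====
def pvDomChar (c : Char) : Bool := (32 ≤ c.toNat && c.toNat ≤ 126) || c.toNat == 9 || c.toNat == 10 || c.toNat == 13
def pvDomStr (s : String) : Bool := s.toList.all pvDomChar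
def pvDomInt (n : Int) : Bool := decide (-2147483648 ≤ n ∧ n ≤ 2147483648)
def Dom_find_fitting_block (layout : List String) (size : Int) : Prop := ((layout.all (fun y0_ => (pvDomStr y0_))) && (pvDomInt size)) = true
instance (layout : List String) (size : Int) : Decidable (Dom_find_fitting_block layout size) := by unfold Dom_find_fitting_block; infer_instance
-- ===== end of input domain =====

-- B replaces A's running free-run counter scan by a boundary-index list plus gap arithmetic (alternative decomposition, same cost).

-- ===== PORT A =====
-- A's for-loop over range(len(layout)) with state (i, free_size) and early return
def findA_loop : List String → Int → Int → Int → Int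
  | [], _, _, _ => -1
  | c :: rest, i, free, size =>
    if c = "." then findA_loop rest (i + 1) (free + 1) size
    else if size ≤ free then i - free
    else findA_loop rest (i + 1) 0 size

def find_fitting_block (layout : List String) (size : Int) : Int :=
  findA_loop layout 0 0 size

-- ===== PORT B =====
-- Source B's comprehension [i for i, cell in enumerate(layout) if cell != "."]
def bBounds : List String → Int → List Int
  | [], _ => []
  | c :: rest, i => if c ≠ "." then i :: bBounds rest (i + 1) else bBounds rest (i + 1)

-- Source B's loop over bounds with state prev and early return
def findB_loop : List Int → Int → Int → Int
  | [], _, _ => -1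
  | j :: rest, prev, size =>
    if size ≤ j - prev - 1 then prev + 1
    else findB_loop rest j size

def find_fitting_block_alt (layout : List String) (size : Int) : Int :=
  findB_loop (bBounds layout 0) (-1) size

-- ===== PRECONDITION & SPEC =====
def Spec_find_fitting_block (layout : List String) (size : Int) (out : Int) : Prop := out = find_fitting_block_alt layout size
instance (layout : List String) (size : Int) (out : Int) : Decidable (Spec_find_fitting_block layout size out) := by unfold Spec_find_fitting_block; infer_instance

-- ===== CLAIM (what is proved, stated in full; the proofs are below) =====
def Claim_equal_find_fitting_block : Prop := ∀ (layout : List String) (size : Int), Dom_find_fitting_block layout size → Spec_find_fitting_block layout size (find_fitting_block layout size)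

-- ===== LEMMAS AND PROOFS =====

-- Invariant: A's free-run counter `free` and B's last-boundary marker `prev` are related by prev = i - free - 1.
theorem loops_agree : ∀ (l : List String) (i free size : Int),
    findA_loop l i free size = findB_loop (bBounds l i) (i - free - 1) size := by
  intro l
  induction l with
  | nil => intro i free size; rfl
  | cons c rest ih =>
    intro i free size
    by_cases hc : c = "."
    · simp [findA_loop, bBounds, hc]
      have := ih (i + 1) (free + 1) size
      have harg : i + 1 - (free + 1) - 1 = i - free - 1 := by ring
      rw [harg] at this
      exact this
    · simp [findA_loop, bBounds, hc, findB_loop]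
      by_cases hs : size ≤ free
      · have h2 : size < i - (i - free - 1) := by omega
        simp [hs, h2]
      · have h2 : ¬ size < i - (i - free - 1) := by omega
        simp [hs, h2]
        have := ih (i + 1) 0 size
        have harg : i + 1 - 0 - 1 = i := by ring
        rw [harg] at this
        exact this

-- ===== VERDICT (by name: the statement is the Claim_ definition above) =====
theorem find_fitting_block_spec : Claim_equal_find_fitting_block := by
  intro layout size _
  unfold Spec_find_fitting_block find_fitting_block find_fitting_block_alt
  have := loops_agree layout 0 0 size
  norm_num at this
  exact this
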